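-- pv_equiv track=rewrite | github.com/johnzhoudev/leetcode-practice | meta/Rotary Lock (Chapter 2).py | solve
-- ===== SOURCE A (Python) =====
-- def solve(n, m, c):
--     # keys are states, value is moves to get to state
--     states = {}
--     states[(1, 1)] = 0
--
--     def calcDistance(a, b):
--         if a > b: return calcDistance(b, a)
--         # a <= b
--         return min(b - a, n - (b - a))
--
--     for target in c:
--         newStates = {}
--         for x, y in states:
--             if (target, y) not in newStates:
--                 newStates[(target, y)] = calcDistance(x, target) + states[(x, y)]
--             else:
--                 newStates[(target, y)] = min(newStates[target, y], calcDistance(x, target) + states[(x, y)])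
--
--             if (x, target) not in newStates:
--                 newStates[(x, target)] = calcDistance(target, y) + states[(x, y)]
--             else:
--                 newStates[(x, target)] = min(newStates[x, target], calcDistance(target, y) + states[(x, y)])
--
--         states = newStates
--
--     best = float('inf')
--     for state in states:
--         best = min(states[state], best)
--     return best
-- ===== SOURCE B (Python) =====
-- def solve(n, m, c):
--     # Offset DP over the other finger's position, with a persistent segment tree
--     # over the sorted candidate positions for circular-distance min queries.
--     # Correctness: after pressing a prefix, one finger sits on the last target
--     # `prev`; value[o] = best cost with the other finger at o.  Pressing t either
--     # moves prev's finger (all values += dist(prev,t), handled by a global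
--     # offset) or the other finger (value min(o) over value[o]+dist(o,t), a "stay"
--     # candidate stored at position prev).  dist(o,t)=min(|o-t|, n-|o-t|) splits
--     # into four linear terms, each a prefix/suffix/full min of base-o or base+o,
--     # answered by segment trees keyed on the sorted distinct positions.
--     def dist(a, b):
--         d = b - a if b >= a else a - b
--         return d if d <= n - d else n - d
--
--     def omin(x, y):
--         if x is None: return y
--         if y is None: return x
--         return x if x <= y else y
--
--     # persistent segment tree node: [size, cached_min, left, right]; leaf has left=right=None
--     def build(vals):
--         if len(vals) == 1:
--             return [1, vals[0], None, None]
--         mid = len(vals) // 2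
--         l = build(vals[:mid])
--         r = build(vals[mid:])
--         return [len(vals), omin(l[1], r[1]), l, r]
--
--     def update(t, i, v):  # min-combine value v into leaf i
--         if t[2] is None:
--             return [1, omin(t[1], v), None, None]
--         sl = t[2][0]
--         if i < sl:
--             l2 = update(t[2], i, v)
--             return [t[0], omin(l2[1], t[3][1]), l2, t[3]]
--         r2 = update(t[3], i - sl, v)
--         return [t[0], omin(t[2][1], r2[1]), t[2], r2]
--
--     def query(t, a, b):  # min over leaves with index in [a, b)
--         if b <= 0 or t[0] <= a:
--             return None
--         if a <= 0 and t[0] <= b: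
--             return t[1]
--         sl = t[2][0]
--         return omin(query(t[2], a, b), query(t[3], a - sl, b - sl))
--
--     P = sorted(set(c) | {1})
--     idx = {p: i for i, p in enumerate(P)}
--     none_leaves = [None] * len(P)
--     j1 = idx[1]
--     tb = update(build(none_leaves), j1, 0)       # min of base
--     tp = update(build(none_leaves), j1, 0 + 1)   # min of base + position
--     tm = update(build(none_leaves), j1, 0 - 1)   # min of base - position
--     off = 0
--     prev = 1
--     for t in c:
--         j = idx[t]
--         qpre = query(tm, 0, j + 1)   # min(base - o) over o <= t
--         qsuf = query(tp, j, len(P))  # min(base + o) over o >= t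
--         fp = tp[1]                   # min(base + o) over all o
--         fm = tm[1]                   # min(base - o) over all o
--         best = None
--         if qpre is not None: best = omin(best, qpre + t)
--         if qsuf is not None: best = omin(best, qsuf - t)
--         if fp is not None: best = omin(best, fp + n - t)
--         if fm is not None: best = omin(best, fm + n + t)
--         stay = off + best
--         off += dist(prev, t)
--         k = idx[prev]
--         tb = update(tb, k, stay - off)
--         tp = update(tp, k, stay - off + prev)
--         tm = update(tm, k, stay - off - prev)
--         prev = t
--     return off + tb[1]
-- ===== Notes on version B (the rewrite author's own statement) =====
-- stated objective: faster
-- what changed: Replaces A's dict-of-finger-pair DP (rescanning all ~2i states per target) by an offset DP over the free finger's position whose per-target 'stay' minimum is answered by persistent segment trees over the sorted distinct positions, after splitting the circular distance min(|o-t|, n-|o-t|) into four linear prefix/suffix/full range-min terms.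
import Mathlib
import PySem

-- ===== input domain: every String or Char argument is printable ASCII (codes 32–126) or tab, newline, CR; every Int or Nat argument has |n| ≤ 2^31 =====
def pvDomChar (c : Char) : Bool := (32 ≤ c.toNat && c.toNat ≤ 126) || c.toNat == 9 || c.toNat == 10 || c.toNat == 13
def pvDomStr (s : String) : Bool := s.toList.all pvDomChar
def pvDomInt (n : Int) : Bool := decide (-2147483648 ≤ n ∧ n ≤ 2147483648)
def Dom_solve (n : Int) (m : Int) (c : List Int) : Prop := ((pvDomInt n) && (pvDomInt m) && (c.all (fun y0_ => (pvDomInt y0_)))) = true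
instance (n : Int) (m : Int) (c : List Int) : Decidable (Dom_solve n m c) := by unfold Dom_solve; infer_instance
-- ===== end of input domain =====

-- B replaces A's dict-of-finger-pair DP by an offset DP over the free finger's position whose
-- per-target minimum is answered by persistent segment trees over the sorted distinct positions;
-- measurably faster (O(m log m) vs O(m^2) dict passes).

-- ===== PORT A =====
-- calcDistance(a, b): recursive swap, then min(b-a, n-(b-a))
def calcDistA (n a b : Int) : Int :=
  if a > b then calcDistA n b a
  else min (b - a) (n - (b - a))
termination_by (if a > b then (1 : Nat) else 0)
decreasing_by simp_all; omega

-- 'if k not in newStates: newStates[k] = v else: newStates[k] = min(newStates[k], v)'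
def aUpd (d : PySem.Dict (Int × Int) Int) (k : Int × Int) (v : Int) : PySem.Dict (Int × Int) Int :=
  if !(d.contains k) then d.insert k v
  else d.insert k (min ((d.get? k).getD 0) v)

-- body of 'for x, y in states:' (two updates per state)
def aBody (n target : Int) (states : PySem.Dict (Int × Int) Int)
    (newStates : PySem.Dict (Int × Int) Int) (xy : Int × Int) : PySem.Dict (Int × Int) Int :=
  let v := (states.get? xy).getD 0
  aUpd (aUpd newStates (target, xy.2) (calcDistA n xy.1 target + v))
       (xy.1, target) (calcDistA n target xy.2 + v)

-- body of 'for target in c:'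
def aStep (n : Int) (states : PySem.Dict (Int × Int) Int) (target : Int) : PySem.Dict (Int × Int) Int :=
  states.keys.foldl (aBody n target states) PySem.Dict.empty

def solve (n : Int) (m : Int) (c : List Int) : Int :=
  let states := c.foldl (aStep n) ((PySem.Dict.empty).insert (1, 1) 0)
  -- best = float('inf'); for state in states: best = min(states[state], best)  (inf ⇒ none; states is never empty)
  let best := states.keys.foldl
    (fun best k => match best with
      | none => some ((states.get? k).getD 0)
      | some b => some (min ((states.get? k).getD 0) b)) (none : Option Int)
  best.getD 0

-- ===== PORT B =====
-- def dist(a, b) of Source B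
def distB (n a b : Int) : Int :=
  let d := if b ≥ a then b - a else a - b
  if d ≤ n - d then d else n - d

-- def omin(x, y) of Source B ('x if x <= y else y' is min x y)
def omin2 : Option Int → Option Int → Option Int
  | none, y => y
  | some x, none => some x
  | some x, some y => some (min x y)

-- persistent segment-tree node of Source B: leaf carries its value, node carries size and cached min
inductive Seg where
  | leaf : Option Int → Seg
  | node : Nat → Option Int → Seg → Seg → Seg
deriving DecidableEq, Repr

def Seg.size : Seg → Nat
  | .leaf _ => 1
  | .node sz _ _ _ => sz

def Seg.val : Seg → Option Int
  | .leaf v => v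
  | .node _ v _ _ => v

-- def build(vals) of Source B (only ever called on a non-empty list; the ≤ 1 guard makes it total)
def segBuild (vals : List (Option Int)) : Seg :=
  if vals.length ≤ 1 then Seg.leaf (vals.headD none)
  else
    let mid := vals.length / 2
    let l := segBuild (vals.take mid)
    let r := segBuild (vals.drop mid)
    Seg.node vals.length (omin2 l.val r.val) l r
termination_by vals.length
decreasing_by
  · simp; omega
  · simp; omega

-- def update(t, i, v) of Source B: min-combine v into leaf i
def segUpdate : Seg → Int → Int → Seg
  | .leaf w, _, v => Seg.leaf (omin2 w (some v))
  | .node sz _ l r, i, v =>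
    if i < (l.size : Int) then
      let l2 := segUpdate l i v
      Seg.node sz (omin2 l2.val r.val) l2 r
    else
      let r2 := segUpdate r (i - (l.size : Int)) v
      Seg.node sz (omin2 l.val r2.val) l r2

-- def query(t, a, b) of Source B: min over leaves with index in [a, b)
def segQuery : Seg → Int → Int → Option Int
  | .leaf v, a, b =>
    if b ≤ 0 ∨ (1 : Int) ≤ a then none
    else if a ≤ 0 ∧ (1 : Int) ≤ b then v
    else none   -- unreachable for a leaf (it is always disjoint from or contained in [a,b))
  | .node sz cv l r, a, b =>
    if b ≤ 0 ∨ (sz : Int) ≤ a then none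
    else if a ≤ 0 ∧ (sz : Int) ≤ b then cv
    else omin2 (segQuery l a b) (segQuery r (a - (l.size : Int)) (b - (l.size : Int)))

-- body of 'for t in c:' over the state ((tb, tp, tm), off, prev)
def segStep (n : Int) (P : List Int) (idx : PySem.Dict Int Int)
    (st : (Seg × Seg × Seg) × Int × Int) (t : Int) : (Seg × Seg × Seg) × Int × Int :=
  let tb := st.1.1; let tp := st.1.2.1; let tm := st.1.2.2
  let off := st.2.1; let prev := st.2.2
  let j := (idx.get? t).getD 0
  let qpre := segQuery tm 0 (j + 1)
  let qsuf := segQuery tp j (P.length : Int)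
  let fp := tp.val
  let fm := tm.val
  let best : Option Int := none
  let best := match qpre with | none => best | some v => omin2 best (some (v + t))
  let best := match qsuf with | none => best | some v => omin2 best (some (v - t))
  let best := match fp with | none => best | some v => omin2 best (some (v + n - t))
  let best := match fm with | none => best | some v => omin2 best (some (v + n + t))
  let stay := off + best.getD 0      -- best is never none on reachable states
  let off := off + distB n prev t
  let k := (idx.get? prev).getD 0
  ((segUpdate tb k (stay - off), segUpdate tp k (stay - off + prev), segUpdate tm k (stay - off - prev)),
   off, t)

def solve_alt (n : Int) (m : Int) (c : List Int) : Int :=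
  let P := PySem.List.sorted (PySem.Set.union (PySem.Set.ofList c) [1]) (fun x => x) false
  let idx := (PySem.List.enumerate P).foldl (fun d p => d.insert p.2 p.1) PySem.Dict.empty
  let noneLeaves := List.replicate P.length (none : Option Int)
  let j1 := (idx.get? 1).getD 0
  let tb := segUpdate (segBuild noneLeaves) j1 0
  let tp := segUpdate (segBuild noneLeaves) j1 (0 + 1)
  let tm := segUpdate (segBuild noneLeaves) j1 (0 - 1)
  let r := c.foldl (segStep n P idx) ((tb, tp, tm), 0, 1)
  r.2.1 + (r.1.1.val).getD 0

-- ===== PRECONDITION & SPEC =====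
def Spec_solve (n : Int) (m : Int) (c : List Int) (out : Int) : Prop := out = solve_alt n m c
instance (n : Int) (m : Int) (c : List Int) (out : Int) : Decidable (Spec_solve n m c out) := by unfold Spec_solve; infer_instance

-- ===== CLAIM (what is proved, stated in full; the proofs are below) =====
def Claim_equal_solve : Prop := ∀ (n : Int) (m : Int) (c : List Int), Dom_solve n m c → Spec_solve n m c (solve n m c)

-- ===== LEMMAS AND PROOFS =====

-- ---------- the 1-D reference model: dp over the free finger's position ----------
def bUpd (d : PySem.Dict Int Int) (k : Int) (v : Int) : PySem.Dict Int Int :=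
  if !(d.contains k) || v < (d.get? k).getD 0 then d.insert k v else d

def bStep (n : Int) (pd : Int × PySem.Dict Int Int) (t : Int) : Int × PySem.Dict Int Int :=
  let prev := pd.1
  let dp := pd.2
  let movePrev := distB n prev t
  let stay := ((PySem.List.min? (dp.items.map (fun oc => oc.2 + distB n oc.1 t)) (fun x => x)).getD 0)
  let new := dp.items.foldl (fun new oc => bUpd new oc.1 (oc.2 + movePrev)) PySem.Dict.empty
  let new := bUpd new prev stay
  (t, new)


theorem dist_eq (n a b : Int) : calcDistA n a b = distB n a b := by
  rw [calcDistA]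
  split_ifs with h
  · rw [calcDistA]; unfold distB
    simp only [min_def]; split_ifs <;> omega
  · unfold distB
    simp only [min_def]; split_ifs <;> omega

theorem distB_comm (n a b : Int) : distB n a b = distB n b a := by
  unfold distB; dsimp only; split_ifs <;> omega

-- running min as an Option fold
def omin (a : Option Int) (v : Int) : Option Int :=
  some (match a with | none => v | some w => min w v)

theorem foldl_omin_some (l : List Int) (a : Int) :
    l.foldl omin (some a) = some (l.foldl min a) := by
  induction l generalizing a with
  | nil => rfl
  | cons x t ih => simp [omin, ih]

theorem foldl_omin_none (l : List Int) :
    l.foldl omin none = PySem.List.min? l (fun x => x) := by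
  cases l with
  | nil => rfl
  | cons x t => simp [omin, foldl_omin_some, PySem.List.min?_id_cons]

theorem min?_congr (l l' : List Int) (h : ∀ v, v ∈ l ↔ v ∈ l') :
    PySem.List.min? l (fun x => x) = PySem.List.min? l' (fun x => x) := by
  cases hl : PySem.List.min? l (fun x => x) with
  | none =>
      rw [PySem.List.min?_eq_none_iff] at hl
      cases hl' : PySem.List.min? l' (fun x => x) with
      | none => rfl
      | some m' =>
          have := PySem.List.min?_mem hl'
          rw [← h] at this
          simp [hl] at this
  | some m =>
      cases hl' : PySem.List.min? l' (fun x => x) with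
      | none =>
          rw [PySem.List.min?_eq_none_iff] at hl'
          have := PySem.List.min?_mem hl
          rw [h] at this
          simp [hl'] at this
      | some m' =>
          have hm := PySem.List.min?_mem hl
          have hm' := PySem.List.min?_mem hl'
          have h1 := PySem.List.min?_isMin hl m' ((h m').mpr hm')
          have h2 := PySem.List.min?_isMin hl' m ((h m).mp hm)
          simp only at h1 h2
          exact congrArg some (le_antisymm h1 h2)

-- generic characterisation of a min-update fold over (key, value) pairs
theorem get?_foldl_upd {κ : Type} [BEq κ] [LawfulBEq κ] [DecidableEq κ]
    (g : PySem.Dict κ Int → κ → Int → PySem.Dict κ Int)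
    (hg : ∀ d k v k', (g d k v).get? k' =
      if k' = k then some (match d.get? k with | none => v | some w => min w v) else d.get? k')
    (l : List (κ × Int)) (d : PySem.Dict κ Int) (k : κ) :
    (l.foldl (fun d p => g d p.1 p.2) d).get? k =
      ((l.filter (fun p => p.1 = k)).map (fun p => p.2)).foldl omin (d.get? k) := by
  induction l generalizing d with
  | nil => rfl
  | cons p t ih =>
      simp only [List.foldl_cons, ih, List.filter_cons]
      by_cases hk : p.1 = k
      · simp [hk, hg, omin]
      · simp [hk, hg, Ne.symm hk]

theorem get?_aUpd (d : PySem.Dict (Int × Int) Int) (k : Int × Int) (v : Int) (k' : Int × Int) :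
    (aUpd d k v).get? k' =
      if k' = k then some (match d.get? k with | none => v | some w => min w v) else d.get? k' := by
  unfold aUpd
  by_cases hc : d.contains k
  · have : ∃ w, d.get? k = some w := by
      have := PySem.Dict.contains_eq_isSome_get? d k
      rw [hc] at this
      exact Option.isSome_iff_exists.mp this.symm
    obtain ⟨w, hw⟩ := this
    simp [hc, PySem.Dict.get?_insert, hw]
  · have hn : d.get? k = none := by
      have := PySem.Dict.contains_eq_isSome_get? d k
      simp [hc] at this
      exact Option.not_isSome_iff_eq_none.mp (by simp [← this])
    simp [hc, PySem.Dict.get?_insert, hn]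

theorem get?_bUpd (d : PySem.Dict Int Int) (k : Int) (v : Int) (k' : Int) :
    (bUpd d k v).get? k' =
      if k' = k then some (match d.get? k with | none => v | some w => min w v) else d.get? k' := by
  unfold bUpd
  by_cases hc : d.contains k
  · have : ∃ w, d.get? k = some w := by
      have := PySem.Dict.contains_eq_isSome_get? d k
      rw [hc] at this
      exact Option.isSome_iff_exists.mp this.symm
    obtain ⟨w, hw⟩ := this
    by_cases hv : v < w
    · simp [hc, hw, hv, PySem.Dict.get?_insert, le_of_lt hv]
    · have hcond : (!d.contains k || decide (v < (d.get? k).getD 0)) = false := by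
        simp [hc, hw]; omega
      rw [hcond]
      simp only [Bool.false_eq_true, if_false]
      split_ifs with h
      · subst h
        rw [hw]
        have hm : min w v = w := by omega
        simp [hm]
      · rfl
  · have hn : d.get? k = none := by
      have := PySem.Dict.contains_eq_isSome_get? d k
      simp [hc] at this
      exact Option.not_isSome_iff_eq_none.mp (by simp [← this])
    simp [hc, PySem.Dict.get?_insert, hn]

-- membership in keys ↔ get? returns a value
theorem mem_keys_iff_get? {κ : Type} [BEq κ] [LawfulBEq κ] (d : PySem.Dict κ Int) (k : κ) :
    k ∈ d.keys ↔ ∃ v, d.get? k = some v := by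
  constructor
  · intro h
    cases hg : d.get? k with
    | none => exact absurd h ((PySem.Dict.get?_eq_none_iff_not_mem_keys d k).mp hg)
    | some v => exact ⟨v, rfl⟩
  · rintro ⟨v, hv⟩
    by_contra h
    rw [(PySem.Dict.get?_eq_none_iff_not_mem_keys d k).mpr h] at hv
    simp at hv

-- the invariant relating A's pair-state dict to the model's (prev, dp)
def StInv (t : Int) (dp : PySem.Dict Int Int) (st : PySem.Dict (Int × Int) Int) : Prop :=
  dp.keys.Nodup ∧ dp.items ≠ [] ∧
  (∀ x y, st.contains (x, y) = true → x = t ∨ y = t) ∧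
  (∀ o, st.get? (t, o) = dp.get? o) ∧
  (∀ o, st.get? (o, t) = dp.get? o)

-- ---------- machinery for the step lemma ----------

-- the list the model minimises for 'stay'
def stayList (n t' : Int) (dp : PySem.Dict Int Int) : List Int :=
  dp.items.map (fun oc => oc.2 + distB n oc.1 t')

-- A's per-state contributions, flattened to (key, value) pairs
def contribsOf (n t' : Int) (st : PySem.Dict (Int × Int) Int) : List ((Int × Int) × Int) :=
  st.keys.flatMap (fun xy =>
    [((t', xy.2), calcDistA n xy.1 t' + (st.get? xy).getD 0),
     ((xy.1, t'), calcDistA n t' xy.2 + (st.get? xy).getD 0)])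

def valsOf (n t' : Int) (st : PySem.Dict (Int × Int) Int) (k : Int × Int) : List Int :=
  ((contribsOf n t' st).filter (fun p => p.1 = k)).map (fun p => p.2)

-- the candidate values feeding the minimum at other-finger position o after pressing t'
def Rpred (n t t' : Int) (dp : PySem.Dict Int Int) (o v : Int) : Prop :=
  (o ≠ t ∧ ∃ w, dp.get? o = some w ∧ v = w + distB n t t') ∨
  (o = t ∧ ∃ x w, dp.get? x = some w ∧ v = w + distB n x t')

def LoOf (n t t' : Int) (dp : PySem.Dict Int Int) (o : Int) : List Int :=
  if o = t then stayList n t' dp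
  else (match dp.get? o with | some w => [w + distB n t t'] | none => [])

theorem foldl_double (n t' : Int) (st : PySem.Dict (Int × Int) Int)
    (l : List (Int × Int)) (d0 : PySem.Dict (Int × Int) Int) :
    l.foldl (aBody n t' st) d0
      = (l.flatMap (fun xy =>
          [((t', xy.2), calcDistA n xy.1 t' + (st.get? xy).getD 0),
           ((xy.1, t'), calcDistA n t' xy.2 + (st.get? xy).getD 0)])).foldl
          (fun d p => aUpd d p.1 p.2) d0 := by
  induction l generalizing d0 with
  | nil => rfl
  | cons xy tl ih => simp [aBody, ih]

theorem aStep_get? (n t' : Int) (st : PySem.Dict (Int × Int) Int) (k : Int × Int) :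
    (aStep n st t').get? k = PySem.List.min? (valsOf n t' st k) (fun x => x) := by
  unfold aStep valsOf contribsOf
  rw [foldl_double, get?_foldl_upd aUpd get?_aUpd, PySem.Dict.get?_empty, foldl_omin_none]

theorem vals_mem (n t' : Int) (st : PySem.Dict (Int × Int) Int) (a b v : Int) :
    v ∈ valsOf n t' st (a, b) ↔
      ∃ x y, (x, y) ∈ st.keys ∧
        (((a, b) = ((t' : Int), y) ∧ v = calcDistA n x t' + (st.get? (x, y)).getD 0) ∨
         ((a, b) = (x, (t' : Int)) ∧ v = calcDistA n t' y + (st.get? (x, y)).getD 0)) := by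
  unfold valsOf contribsOf
  simp only [List.mem_map, List.mem_filter, List.mem_flatMap, List.mem_cons,
    List.not_mem_nil, or_false]
  constructor
  · rintro ⟨p, ⟨⟨⟨x, y⟩, hxy, hp⟩, hk⟩, hv⟩
    refine ⟨x, y, hxy, ?_⟩
    simp only [decide_eq_true_eq] at hk
    rcases hp with hp | hp <;> subst hp
    · exact Or.inl ⟨hk.symm ▸ rfl, hv.symm⟩
    · exact Or.inr ⟨hk.symm ▸ rfl, hv.symm⟩
  · rintro ⟨x, y, hxy, hc | hc⟩
    · exact ⟨((t', y), calcDistA n x t' + (st.get? (x, y)).getD 0),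
        ⟨⟨(x, y), hxy, Or.inl rfl⟩, by simp [hc.1]⟩, hc.2.symm⟩
    · exact ⟨((x, t'), calcDistA n t' y + (st.get? (x, y)).getD 0),
        ⟨⟨(x, y), hxy, Or.inr rfl⟩, by simp [hc.1]⟩, hc.2.symm⟩

-- with the invariant, membership in valsOf is exactly the Rpred disjunction
theorem vals_iff_R (n t t' : Int) (dp : PySem.Dict Int Int) (st : PySem.Dict (Int × Int) Int)
    (hshape : ∀ x y, st.contains (x, y) = true → x = t ∨ y = t)
    (hget1 : ∀ o, st.get? (t, o) = dp.get? o)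
    (hget2 : ∀ o, st.get? (o, t) = dp.get? o)
    (a b v : Int) :
    v ∈ valsOf n t' st (a, b) ↔ ((a = t' ∧ Rpred n t t' dp b v) ∨ (b = t' ∧ Rpred n t t' dp a v)) := by
  have keyfact : ∀ x y : Int, (x, y) ∈ st.keys →
      (x = t ∨ y = t) ∧ st.get? (x, y) = some ((st.get? (x, y)).getD 0) := by
    intro x y hk
    obtain ⟨w, hw⟩ := (mem_keys_iff_get? st (x, y)).mp hk
    have hc : st.contains (x, y) = true := by
      rw [PySem.Dict.contains_eq_isSome_get?, hw]; rfl
    exact ⟨hshape x y hc, by rw [hw]; rfl⟩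
  rw [vals_mem]
  unfold Rpred
  constructor
  · rintro ⟨x, y, hxy, ⟨hk, hv⟩ | ⟨hk, hv⟩⟩
    · have ha : a = t' := congrArg Prod.fst hk
      have hb : b = y := congrArg Prod.snd hk
      left
      refine ⟨ha, ?_⟩
      rw [hb]
      rw [dist_eq] at hv
      rcases (keyfact x y hxy).1 with hx | hy
      · have hval := (keyfact x y hxy).2
        rw [hx, hget1 y] at hval
        rw [hx, hget1 y] at hv
        by_cases hyt : y = t
        · rw [hyt] at hval hv ⊢
          exact Or.inr ⟨rfl, t, (dp.get? t).getD 0, hval, by omega⟩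
        · exact Or.inl ⟨hyt, (dp.get? y).getD 0, hval, by omega⟩
      · have hval := (keyfact x y hxy).2
        rw [hy, hget2 x] at hval
        rw [hy, hget2 x] at hv
        exact Or.inr ⟨hy, x, (dp.get? x).getD 0, hval, by omega⟩
    · have ha : a = x := congrArg Prod.fst hk
      have hb : b = t' := congrArg Prod.snd hk
      right
      refine ⟨hb, ?_⟩
      rw [ha]
      rw [dist_eq, distB_comm n t' y] at hv
      rcases (keyfact x y hxy).1 with hx | hy
      · have hval := (keyfact x y hxy).2
        rw [hx, hget1 y] at hval
        rw [hx, hget1 y] at hv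
        rw [hx]
        exact Or.inr ⟨rfl, y, (dp.get? y).getD 0, hval, by omega⟩
      · have hval := (keyfact x y hxy).2
        rw [hy, hget2 x] at hval
        rw [hy, hget2 x] at hv
        by_cases hxt : x = t
        · rw [hxt] at hval hv ⊢
          exact Or.inr ⟨rfl, t, (dp.get? t).getD 0, hval, by omega⟩
        · exact Or.inl ⟨hxt, (dp.get? x).getD 0, hval, by omega⟩
  · rintro (⟨ha, hr⟩ | ⟨hb, hr⟩)
    · rcases hr with ⟨hbt, w, hw, hv⟩ | ⟨hbt, x, w, hw, hv⟩
      · have hst : st.get? (t, b) = some w := by rw [hget1]; exact hw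
        have hk : (t, b) ∈ st.keys := (mem_keys_iff_get? st (t, b)).mpr ⟨w, hst⟩
        refine ⟨t, b, hk, Or.inl ⟨by rw [ha], ?_⟩⟩
        rw [hst, dist_eq]
        simp only [Option.getD_some]
        omega
      · have hst : st.get? (x, t) = some w := by rw [hget2]; exact hw
        have hk : (x, t) ∈ st.keys := (mem_keys_iff_get? st (x, t)).mpr ⟨w, hst⟩
        refine ⟨x, t, hk, Or.inl ⟨by rw [ha, hbt], ?_⟩⟩
        rw [hst, dist_eq]
        simp only [Option.getD_some]
        omega
    · rcases hr with ⟨hat, w, hw, hv⟩ | ⟨hat, x, w, hw, hv⟩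
      · have hst : st.get? (a, t) = some w := by rw [hget2]; exact hw
        have hk : (a, t) ∈ st.keys := (mem_keys_iff_get? st (a, t)).mpr ⟨w, hst⟩
        refine ⟨a, t, hk, Or.inr ⟨by rw [hb], ?_⟩⟩
        rw [hst, dist_eq, distB_comm n t' t]
        simp only [Option.getD_some]
        omega
      · have hst : st.get? (t, x) = some w := by rw [hget1]; exact hw
        have hk : (t, x) ∈ st.keys := (mem_keys_iff_get? st (t, x)).mpr ⟨w, hst⟩
        refine ⟨t, x, hk, Or.inr ⟨by rw [hat, hb], ?_⟩⟩
        rw [hst, dist_eq, distB_comm n t' x]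
        simp only [Option.getD_some]
        omega

theorem Lo_mem (n t t' : Int) (dp : PySem.Dict Int Int) (hnd : dp.keys.Nodup) (o v : Int) :
    v ∈ LoOf n t t' dp o ↔ Rpred n t t' dp o v := by
  unfold LoOf Rpred stayList
  by_cases ho : o = t
  · subst ho
    rw [if_pos rfl]
    simp only [List.mem_map]
    constructor
    · rintro ⟨⟨x, w⟩, hmem, hv⟩
      exact Or.inr ⟨by trivial, x, w, PySem.Dict.get?_of_mem_items dp hmem hnd, hv.symm⟩
    · rintro (⟨hne, _⟩ | ⟨_, x, w, hw, hv⟩)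
      · exact (hne (by trivial)).elim
      · exact ⟨(x, w), PySem.Dict.mem_items_of_get?_eq_some dp hw, hv.symm⟩
  · simp only [if_neg ho]
    cases hg : dp.get? o with
    | some w =>
        simp only [List.mem_singleton]
        constructor
        · intro hv; exact Or.inl ⟨ho, w, rfl, hv⟩
        · rintro (⟨_, w', hw', hv⟩ | ⟨hot, _⟩)
          · cases hw'; exact hv
          · exact absurd hot ho
    | none =>
        simp only [List.not_mem_nil, false_iff]
        rintro (⟨_, w', hw', _⟩ | ⟨hot, _⟩)
        · simp at hw'
        · exact absurd hot ho

theorem min?_Lo (n t t' : Int) (dp : PySem.Dict Int Int) (o : Int) :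
    PySem.List.min? (LoOf n t t' dp o) (fun x => x)
      = if o = t then PySem.List.min? (stayList n t' dp) (fun x => x)
        else (dp.get? o).map (fun w => w + distB n t t') := by
  unfold LoOf
  by_cases ho : o = t
  · simp [ho]
  · simp only [if_neg ho]
    cases hg : dp.get? o with
    | some w => simp [PySem.List.min?_id_cons]
    | none => rfl

theorem bStep_get? (n t t' : Int) (dp : PySem.Dict Int Int)
    (hnd : dp.keys.Nodup) (hne : dp.items ≠ []) (o : Int) :
    (bStep n (t, dp) t').2.get? o
      = if o = t then PySem.List.min? (stayList n t' dp) (fun x => x)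
        else (dp.get? o).map (fun w => w + distB n t t') := by
  obtain ⟨s, hs⟩ : ∃ s, PySem.List.min? (stayList n t' dp) (fun x => x) = some s := by
    cases hq : PySem.List.min? (stayList n t' dp) (fun x => x) with
    | none =>
        rw [PySem.List.min?_eq_none_iff] at hq
        exact absurd (by simpa [stayList, List.map_eq_nil_iff] using hq) hne
    | some s => exact ⟨s, rfl⟩
  have hnew1 : ∀ o, (dp.items.foldl (fun new oc => bUpd new oc.1 (oc.2 + distB n t t')) PySem.Dict.empty).get? o
      = (dp.get? o).map (fun w => w + distB n t t') := by
    intro o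
    have hfm : dp.items.foldl (fun new oc => bUpd new oc.1 (oc.2 + distB n t t')) PySem.Dict.empty
        = (dp.items.map (fun oc => (oc.1, oc.2 + distB n t t'))).foldl (fun d p => bUpd d p.1 p.2) PySem.Dict.empty := by
      rw [List.foldl_map]
    rw [hfm, get?_foldl_upd bUpd get?_bUpd, PySem.Dict.get?_empty, foldl_omin_none]
    have hmm : ∀ v, v ∈ (((dp.items.map (fun oc => (oc.1, oc.2 + distB n t t'))).filter
          (fun p => p.1 = o)).map (fun p => p.2)) ↔
        ∃ u, (o, u) ∈ dp.items ∧ v = u + distB n t t' := by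
      intro v
      simp only [List.mem_map, List.mem_filter, decide_eq_true_eq]
      constructor
      · rintro ⟨p, ⟨⟨⟨x, u⟩, hxu, hfx⟩, hpo⟩, hpv⟩
        cases hfx
        exact ⟨u, by simpa [← hpo] using hxu, hpv.symm⟩
      · rintro ⟨u, hmem, hv⟩
        exact ⟨(o, u + distB n t t'), ⟨⟨(o, u), hmem, rfl⟩, rfl⟩, hv.symm⟩
    cases hg : dp.get? o with
    | some w =>
        rw [min?_congr _ [w + distB n t t'] ?_]
        · simp [PySem.List.min?_id_cons]
        · intro v
          rw [hmm v, List.mem_singleton]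
          constructor
          · rintro ⟨u, hmem, hv⟩
            have : dp.get? o = some u := PySem.Dict.get?_of_mem_items dp hmem hnd
            rw [hg] at this; cases this
            exact hv
          · intro hv
            exact ⟨w, PySem.Dict.mem_items_of_get?_eq_some dp hg, hv⟩
    | none =>
        rw [min?_congr _ [] ?_]
        · rfl
        · intro v
          rw [hmm v]
          simp only [List.not_mem_nil, iff_false, not_exists]
          rintro u ⟨hmem, _⟩
          have : dp.get? o = some u := PySem.Dict.get?_of_mem_items dp hmem hnd
          rw [hg] at this; cases this
  have hb2 : (bStep n (t, dp) t').2
      = bUpd (dp.items.foldl (fun new oc => bUpd new oc.1 (oc.2 + distB n t t')) PySem.Dict.empty)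
          t ((PySem.List.min? (stayList n t' dp) (fun x => x)).getD 0) := rfl
  rw [hb2, get?_bUpd]
  by_cases ho : o = t
  · rw [if_pos ho, if_pos ho, hnew1 t, hs]
    simp only [Option.getD_some]
    cases hg : dp.get? t with
    | none => rfl
    | some w =>
        have hmem : w + distB n t t' ∈ stayList n t' dp := by
          unfold stayList
          exact List.mem_map.mpr ⟨(t, w), PySem.Dict.mem_items_of_get?_eq_some dp hg, rfl⟩
        have hle := PySem.List.min?_isMin hs _ hmem
        simp only at hle
        simp only [Option.map_some]
        congr 1
        exact min_eq_right hle
  · rw [if_neg ho, if_neg ho]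
    exact hnew1 o

theorem nodup_keys_bUpd (d : PySem.Dict Int Int) (k v : Int) (h : d.keys.Nodup) :
    (bUpd d k v).keys.Nodup := by
  unfold bUpd
  split_ifs
  · exact PySem.Dict.nodup_keys_insert d k v h
  · exact h

theorem bStep_nodup (n t t' : Int) (dp : PySem.Dict Int Int) :
    (bStep n (t, dp) t').2.keys.Nodup := by
  have : ∀ (l : List (Int × Int)) (d : PySem.Dict Int Int), d.keys.Nodup →
      (l.foldl (fun new oc => bUpd new oc.1 (oc.2 + distB n t t')) d).keys.Nodup := by
    intro l
    induction l with
    | nil => exact fun d h => h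
    | cons p tl ih => exact fun d h => ih _ (nodup_keys_bUpd _ _ _ h)
  exact nodup_keys_bUpd _ _ _ (this dp.items PySem.Dict.empty PySem.Dict.nodup_keys_empty)

theorem stayList_some (n t t' : Int) (dp : PySem.Dict Int Int) (hne : dp.items ≠ []) :
    ∃ s, PySem.List.min? (stayList n t' dp) (fun x => x) = some s := by
  cases hq : PySem.List.min? (stayList n t' dp) (fun x => x) with
  | none =>
      rw [PySem.List.min?_eq_none_iff] at hq
      exact absurd (by simpa [stayList, List.map_eq_nil_iff] using hq) hne
  | some s => exact ⟨s, rfl⟩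

theorem inv_step (n t t' : Int) (dp : PySem.Dict Int Int) (st : PySem.Dict (Int × Int) Int)
    (h : StInv t dp st) : StInv t' (bStep n (t, dp) t').2 (aStep n st t') := by
  obtain ⟨hnd, hne, hshape, hget1, hget2⟩ := h
  have hAR : ∀ a b : Int, (aStep n st t').get? (a, b)
      = PySem.List.min? (valsOf n t' st (a, b)) (fun x => x) := fun a b => aStep_get? n t' st (a, b)
  have hVL : ∀ o : Int, PySem.List.min? (valsOf n t' st (t', o)) (fun x => x)
        = PySem.List.min? (LoOf n t t' dp o) (fun x => x) ∧
      PySem.List.min? (valsOf n t' st (o, t')) (fun x => x)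
        = PySem.List.min? (LoOf n t t' dp o) (fun x => x) := by
    intro o
    constructor
    · apply min?_congr
      intro v
      rw [vals_iff_R n t t' dp st hshape hget1 hget2, Lo_mem n t t' dp hnd]
      constructor
      · rintro (⟨_, hr⟩ | ⟨ho, hr⟩)
        · exact hr
        · exact ho ▸ hr
      · intro hr; exact Or.inl ⟨rfl, hr⟩
    · apply min?_congr
      intro v
      rw [vals_iff_R n t t' dp st hshape hget1 hget2, Lo_mem n t t' dp hnd]
      constructor
      · rintro (⟨ho, hr⟩ | ⟨_, hr⟩)
        · exact ho ▸ hr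
        · exact hr
      · intro hr; exact Or.inr ⟨rfl, hr⟩
  have hBo := bStep_get? n t t' dp hnd hne
  have hnd' : (bStep n (t, dp) t').2.keys.Nodup := bStep_nodup n t t' dp
  have hne' : (bStep n (t, dp) t').2.items ≠ [] := by
    obtain ⟨s, hs⟩ := stayList_some n t t' dp hne
    have hg : (bStep n (t, dp) t').2.get? t = some s := by rw [hBo t, if_pos rfl]; exact hs
    have hk : t ∈ (bStep n (t, dp) t').2.keys := (mem_keys_iff_get? _ t).mpr ⟨s, hg⟩
    intro hit
    rw [show (bStep n (t, dp) t').2.keys = (bStep n (t, dp) t').2.items.map Prod.fst from rfl, hit] at hk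
    simp at hk
  refine ⟨hnd', hne', ?_, ?_, ?_⟩
  · intro x y hc
    have : ∃ v, (aStep n st t').get? (x, y) = some v := by
      rw [PySem.Dict.contains_eq_isSome_get?] at hc
      exact Option.isSome_iff_exists.mp hc
    obtain ⟨v, hv⟩ := this
    rw [hAR x y] at hv
    have hmem := PySem.List.min?_mem hv
    rw [vals_iff_R n t t' dp st hshape hget1 hget2] at hmem
    rcases hmem with ⟨hx, _⟩ | ⟨hy, _⟩
    · exact Or.inl hx
    · exact Or.inr hy
  · intro o
    rw [hAR t' o, (hVL o).1, min?_Lo, hBo o]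
  · intro o
    rw [hAR o t', (hVL o).2, min?_Lo, hBo o]

theorem inv_loop (n : Int) (c : List Int) (t : Int) (dp : PySem.Dict Int Int)
    (st : PySem.Dict (Int × Int) Int) (h : StInv t dp st) :
    StInv (c.foldl (bStep n) (t, dp)).1 (c.foldl (bStep n) (t, dp)).2 (c.foldl (aStep n) st) := by
  induction c generalizing t dp st with
  | nil => exact h
  | cons x xs ih =>
      simp only [List.foldl_cons]
      have h1 := inv_step n t x dp st h
      have h2 := ih x (bStep n (t, dp) x).2 (aStep n st x) h1
      simpa using h2

theorem inv_init : StInv 1 ((PySem.Dict.empty).insert 1 0) ((PySem.Dict.empty).insert (1, 1) 0) := by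
  refine ⟨by decide, by decide, ?_, ?_, ?_⟩
  · intro x y h
    simp [PySem.Dict.contains_insert, PySem.Dict.contains_empty, Prod.ext_iff] at h
    exact Or.inl h.1
  · intro o
    simp [PySem.Dict.get?_insert, PySem.Dict.get?_empty, Prod.ext_iff]
  · intro o
    by_cases ho : o = 1 <;> simp [ho, PySem.Dict.get?_insert, PySem.Dict.get?_empty, Prod.ext_iff]

theorem foldl_minflip (l : List Int) (a : Int) :
    l.foldl (fun a v => min v a) a = l.foldl min a := by
  induction l generalizing a with
  | nil => rfl
  | cons x t ih => rw [List.foldl_cons, List.foldl_cons, min_comm, ih]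

theorem foldl_best_eq_min? (g : Int × Int → Int) (l : List (Int × Int)) :
    l.foldl (fun best k => match best with
      | none => some (g k)
      | some b => some (min (g k) b)) (none : Option Int)
    = PySem.List.min? (l.map g) (fun x => x) := by
  cases l with
  | nil => rfl
  | cons x t =>
      simp only [List.foldl_cons, List.map_cons, PySem.List.min?_id_cons]
      rw [show ∀ (a : Int), t.foldl (fun best k => match best with
          | none => some (g k)
          | some b => some (min (g k) b)) (some a) = some ((t.map g).foldl (fun a v => min v a) a) from ?_]
      · rw [foldl_minflip]
      · intro a
        induction t generalizing a with
        | nil => rfl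
        | cons y s ih => simp [ih]

theorem final_eq (t : Int) (dp : PySem.Dict Int Int) (st : PySem.Dict (Int × Int) Int)
    (h : StInv t dp st) :
    (st.keys.foldl (fun best k => match best with
      | none => some ((st.get? k).getD 0)
      | some b => some (min ((st.get? k).getD 0) b)) (none : Option Int)).getD 0
      = (PySem.List.min? dp.values (fun x => x)).getD 0 := by
  obtain ⟨hnd, hne, hshape, hget1, hget2⟩ := h
  rw [foldl_best_eq_min?]
  congr 1
  apply min?_congr
  intro v
  constructor
  · intro hv
    obtain ⟨k, hk, hgk⟩ := List.mem_map.mp hv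
    obtain ⟨w, hw⟩ := (mem_keys_iff_get? st k).mp hk
    have hc : st.contains k = true := by
      rw [PySem.Dict.contains_eq_isSome_get?, hw]; rfl
    have hv' : v = w := by rw [← hgk, hw]; rfl
    subst hv'
    rcases hshape k.1 k.2 (by simpa using hc) with hx | hy
    · have hdp : dp.get? k.2 = some v := by rw [← hget1, ← hx]; simpa using hw
      have := PySem.Dict.mem_items_of_get?_eq_some dp hdp
      exact List.mem_map.mpr ⟨_, this, rfl⟩
    · have hdp : dp.get? k.1 = some v := by rw [← hget2, ← hy]; simpa using hw
      have := PySem.Dict.mem_items_of_get?_eq_some dp hdp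
      exact List.mem_map.mpr ⟨_, this, rfl⟩
  · intro hv
    obtain ⟨⟨pk, pv⟩, hp, hpv⟩ := List.mem_map.mp hv
    have hg : dp.get? pk = some pv := PySem.Dict.get?_of_mem_items dp hp hnd
    have hst : st.get? (t, pk) = some pv := by rw [hget1]; exact hg
    have hk : (t, pk) ∈ st.keys := (mem_keys_iff_get? st (t, pk)).mpr ⟨pv, hst⟩
    exact List.mem_map.mpr ⟨(t, pk), hk, by rw [hst]; exact hpv⟩

theorem part1 (n m : Int) (c : List Int) :
    solve n m c =
      (PySem.List.min? ((c.foldl (bStep n) (1, (PySem.Dict.empty).insert 1 0)).2.values) (fun x => x)).getD 0 := by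
  unfold solve
  exact final_eq _ _ _ (inv_loop n c 1 ((PySem.Dict.empty).insert 1 0) ((PySem.Dict.empty).insert (1, 1) 0) inv_init)

-- ---------- generic option-min machinery ----------
theorem omin2_none_right (x : Option Int) : omin2 x none = x := by cases x <;> rfl

theorem omin2_none_left (x : Option Int) : omin2 none x = x := rfl

theorem omin2_assoc (a b c : Option Int) : omin2 (omin2 a b) c = omin2 a (omin2 b c) := by
  cases a <;> cases b <;> cases c <;> simp [omin2, min_assoc]

def minO (l : List (Option Int)) : Option Int := l.foldl omin2 none

theorem foldl_omin2_eq (l : List (Option Int)) (x : Option Int) :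
    l.foldl omin2 x = omin2 x (minO l) := by
  induction l generalizing x with
  | nil => simp [minO, omin2_none_right]
  | cons a t ih =>
      show t.foldl omin2 (omin2 x a) = omin2 x (minO (a :: t))
      rw [ih (omin2 x a), omin2_assoc]
      have : minO (a :: t) = omin2 a (minO t) := by
        show t.foldl omin2 (omin2 none a) = _
        rw [ih (omin2 none a), show omin2 none a = a from rfl]
      rw [this]

theorem minO_cons (a : Option Int) (t : List (Option Int)) : minO (a :: t) = omin2 a (minO t) := by
  show t.foldl omin2 (omin2 none a) = _
  rw [foldl_omin2_eq t (omin2 none a), show omin2 none a = a from rfl]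

theorem minO_append (xs ys : List (Option Int)) : minO (xs ++ ys) = omin2 (minO xs) (minO ys) := by
  induction xs with
  | nil => rfl
  | cons a t ih => simp only [List.cons_append, minO_cons, ih, omin2_assoc]

theorem omin2_eq_some (x y : Option Int) (v : Int) (h : omin2 x y = some v) :
    x = some v ∨ y = some v := by
  cases x with
  | none => exact Or.inr h
  | some xv =>
      cases y with
      | none => exact Or.inl h
      | some yv =>
          simp only [omin2, Option.some_inj] at h
          rcases min_choice xv yv with hm | hm
          · exact Or.inl (by rw [← h, hm])
          · exact Or.inr (by rw [← h, hm])

theorem omin2_le_left (x : Int) (y : Option Int) :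
    ∃ v, omin2 (some x) y = some v ∧ v ≤ x := by
  cases y with
  | none => exact ⟨x, rfl, le_refl x⟩
  | some yv => exact ⟨min x yv, rfl, min_le_left x yv⟩

theorem omin2_le_right (x : Option Int) (y : Int) :
    ∃ v, omin2 x (some y) = some v ∧ v ≤ y := by
  cases x with
  | none => exact ⟨y, rfl, le_refl y⟩
  | some xv => exact ⟨min xv y, rfl, min_le_right xv y⟩

-- "every defined value of x is at least m"
def GEm (x : Option Int) (m : Int) : Prop := ∀ v, x = some v → m ≤ v

theorem minO_mem (l : List (Option Int)) (v : Int) (h : minO l = some v) : some v ∈ l := by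
  induction l with
  | nil => cases h
  | cons a t ih =>
      rw [minO_cons] at h
      rcases omin2_eq_some _ _ _ h with h' | h'
      · exact h' ▸ List.mem_cons_self
      · exact List.mem_cons_of_mem _ (ih h')

theorem minO_le (l : List (Option Int)) (w : Int) (h : some w ∈ l) :
    ∃ v, minO l = some v ∧ v ≤ w := by
  induction l with
  | nil => cases h
  | cons a t ih =>
      rw [minO_cons]
      rcases List.mem_cons.mp h with h' | h'
      · rw [← h']
        exact omin2_le_left w (minO t)
      · obtain ⟨v, hv, hle⟩ := ih h'
        rw [hv]
        obtain ⟨u, hu, hule⟩ := omin2_le_right a v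
        exact ⟨u, hu, le_trans hule hle⟩

-- min over the leaves with index in [a, b)
def selMin : List (Option Int) → Int → Int → Option Int
  | [], _, _ => none
  | w :: ws, a, b => omin2 (if a ≤ 0 ∧ 0 < b then w else none) (selMin ws (a - 1) (b - 1))

theorem selMin_none (l : List (Option Int)) (a b : Int)
    (h : b ≤ 0 ∨ (l.length : Int) ≤ a) : selMin l a b = none := by
  induction l generalizing a b with
  | nil => rfl
  | cons w ws ih =>
      have hcond : ¬ (a ≤ 0 ∧ 0 < b) := by
        simp only [List.length_cons] at h
        push_cast at h
        omega
      have hrec : selMin ws (a - 1) (b - 1) = none := by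
        apply ih
        simp only [List.length_cons] at h
        push_cast at h ⊢
        omega
      simp [selMin, hcond, hrec, omin2_none_left]

theorem selMin_full (l : List (Option Int)) (a b : Int)
    (ha : a ≤ 0) (hb : (l.length : Int) ≤ b) : selMin l a b = minO l := by
  induction l generalizing a b with
  | nil => rfl
  | cons w ws ih =>
      have hcond : a ≤ 0 ∧ 0 < b := by
        simp only [List.length_cons] at hb
        push_cast at hb
        omega
      rw [selMin, if_pos hcond, minO_cons, ih (a - 1) (b - 1) (by omega)
        (by simp only [List.length_cons] at hb; push_cast at hb ⊢; omega)]

theorem selMin_append (xs ys : List (Option Int)) (a b : Int) :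
    selMin (xs ++ ys) a b
      = omin2 (selMin xs a b) (selMin ys (a - xs.length) (b - xs.length)) := by
  induction xs generalizing a b with
  | nil => simp only [List.nil_append, List.length_nil, Nat.cast_zero, sub_zero]; rfl
  | cons w ws ih =>
      show omin2 (if a ≤ 0 ∧ 0 < b then w else none) (selMin (ws ++ ys) (a - 1) (b - 1)) = _
      rw [ih (a - 1) (b - 1), ← omin2_assoc]
      have h1 : a - 1 - (ws.length : Int) = a - ((w :: ws).length : Int) := by
        simp only [List.length_cons]; push_cast; ring
      have h2 : b - 1 - (ws.length : Int) = b - ((w :: ws).length : Int) := by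
        simp only [List.length_cons]; push_cast; ring
      rw [h1, h2]
      rfl

theorem selMin_mem (l : List (Option Int)) (a b : Int) (v : Int) (h : selMin l a b = some v) :
    ∃ (j : Nat) (hj : j < l.length), a ≤ (j : Int) ∧ (j : Int) < b ∧ l[j] = some v := by
  induction l generalizing a b with
  | nil => cases h
  | cons w ws ih =>
      rcases omin2_eq_some _ _ _ h with h' | h'
      · by_cases hc : a ≤ 0 ∧ 0 < b
        · rw [if_pos hc] at h'
          exact ⟨0, by simp, by exact_mod_cast hc.1, by exact_mod_cast hc.2, h'⟩
        · rw [if_neg hc] at h'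
          cases h'
      · obtain ⟨j, hj, hja, hjb, hget⟩ := ih (a - 1) (b - 1) h'
        exact ⟨j + 1, by simpa using hj, by push_cast; omega, by push_cast at hjb ⊢; omega,
          by simpa using hget⟩

theorem selMin_le (l : List (Option Int)) (a b : Int) (j : Nat) (hj : j < l.length)
    (haj : a ≤ (j : Int)) (hjb : (j : Int) < b) (w : Int) (hw : l[j] = some w) :
    ∃ v, selMin l a b = some v ∧ v ≤ w := by
  induction l generalizing a b j with
  | nil => simp at hj
  | cons x ws ih =>
      cases j with
      | zero =>
          simp only [List.getElem_cons_zero] at hw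
          subst hw
          rw [selMin, if_pos ⟨by exact_mod_cast haj, by exact_mod_cast hjb⟩]
          exact omin2_le_left w (selMin ws (a - 1) (b - 1))
      | succ j' =>
          simp only [List.getElem_cons_succ] at hw
          obtain ⟨v, hv, hle⟩ := ih (a - 1) (b - 1) j' (by simpa using hj)
            (by push_cast at haj ⊢; omega) (by push_cast at hjb ⊢; omega) hw
          rw [selMin, hv]
          obtain ⟨u, hu, hule⟩ := omin2_le_right _ v
          exact ⟨u, hu, le_trans hule hle⟩

-- ---------- segment-tree correctness ----------
def leavesOf : Seg → List (Option Int)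
  | .leaf v => [v]
  | .node _ _ l r => leavesOf l ++ leavesOf r

def SegWf : Seg → Prop
  | .leaf _ => True
  | .node sz cv l r =>
      sz = (leavesOf l).length + (leavesOf r).length ∧ cv = omin2 l.val r.val ∧ SegWf l ∧ SegWf r

theorem size_eq (t : Seg) (wf : SegWf t) : t.size = (leavesOf t).length := by
  cases t with
  | leaf v => rfl
  | node sz cv l r =>
      obtain ⟨h1, _, _, _⟩ := wf
      simp [Seg.size, leavesOf, h1]

theorem val_eq (t : Seg) (wf : SegWf t) : t.val = minO (leavesOf t) := by
  induction t with
  | leaf v => rfl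
  | node sz cv l r ihl ihr =>
      obtain ⟨_, h2, wl, wr⟩ := wf
      show cv = minO (leavesOf l ++ leavesOf r)
      rw [h2, ihl wl, ihr wr, minO_append]

theorem segBuild_spec : ∀ (k : Nat) (vals : List (Option Int)), vals.length ≤ k → vals ≠ [] →
    SegWf (segBuild vals) ∧ leavesOf (segBuild vals) = vals := by
  intro k
  induction k with
  | zero => intro vals h hne; cases vals with
      | nil => exact absurd rfl hne
      | cons a t => simp at h
  | succ k ih =>
      intro vals hlen hne
      rw [segBuild]
      split_ifs with h1
      · obtain ⟨v, rfl⟩ : ∃ v, vals = [v] := by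
          cases vals with
          | nil => exact absurd rfl hne
          | cons a t => cases t with
            | nil => exact ⟨a, rfl⟩
            | cons b t' => simp at h1
        exact ⟨trivial, rfl⟩
      · push_neg at h1
        have h2 : 2 ≤ vals.length := h1
        have hmid1 : 1 ≤ vals.length / 2 := by omega
        have hmid2 : vals.length / 2 < vals.length := by omega
        have htake : (vals.take (vals.length / 2)).length = vals.length / 2 := by
          simp [Nat.min_eq_left (le_of_lt hmid2)]
        have hdrop : (vals.drop (vals.length / 2)).length = vals.length - vals.length / 2 := by
          simp
        have ihl := ih (vals.take (vals.length / 2)) (by omega)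
          (by intro hnil; rw [hnil] at htake; simp at htake; omega)
        have ihr := ih (vals.drop (vals.length / 2)) (by omega)
          (by intro hnil; rw [hnil] at hdrop; simp at hdrop; omega)
        refine ⟨⟨?_, rfl, ihl.1, ihr.1⟩, ?_⟩
        · rw [ihl.2, ihr.2, htake, hdrop]; omega
        · show leavesOf (segBuild _) ++ leavesOf (segBuild _) = vals
          rw [ihl.2, ihr.2, List.take_append_drop]

-- what a point min-update does to the leaf list
def updAt : List (Option Int) → Int → Int → List (Option Int)
  | [], _, _ => []
  | w :: ws, i, v => if i ≤ 0 then (omin2 w (some v)) :: ws else w :: updAt ws (i - 1) v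

theorem length_updAt (l : List (Option Int)) (i : Int) (v : Int) :
    (updAt l i v).length = l.length := by
  induction l generalizing i with
  | nil => rfl
  | cons w ws ih => rw [updAt]; split_ifs <;> simp [ih]

theorem getElem_updAt (l : List (Option Int)) (i : Int) (v : Int) (h0 : 0 ≤ i)
    (j : Nat) (hj : j < l.length) :
    (updAt l i v)[j]'(by rw [length_updAt]; exact hj)
      = if (j : Int) = i then omin2 l[j] (some v) else l[j] := by
  induction l generalizing i j with
  | nil => simp at hj
  | cons w ws ih =>
      have hupd : updAt (w :: ws) i v
          = if i ≤ 0 then (omin2 w (some v)) :: ws else w :: updAt ws (i - 1) v := rfl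
      by_cases hi : i ≤ 0
      · have hi0 : i = 0 := le_antisymm hi h0
        subst hi0
        have hupd0 : updAt (w :: ws) 0 v = (omin2 w (some v)) :: ws := rfl
        cases j with
        | zero => simp [hupd0]
        | succ j' =>
            simp [hupd0]
            intro h
            exfalso
            omega
      · have hupdn : updAt (w :: ws) i v = w :: updAt ws (i - 1) v := by
          rw [hupd, if_neg hi]
        cases j with
        | zero =>
            simp [hupdn]
            intro h
            exfalso
            omega
        | succ j' =>
            have hrec := ih (i - 1) (by omega) j' (by simpa using hj)
            have hcond : (((j' + 1 : Nat) : Int) = i) ↔ (((j' : Nat) : Int) = i - 1) := by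
              push_cast
              omega
            simp only [hupdn, List.getElem_cons_succ, hrec]
            by_cases hc : ((j' : Nat) : Int) = i - 1
            · rw [if_pos hc, if_pos (hcond.mpr hc)]
            · rw [if_neg hc, if_neg (fun hx => hc (hcond.mp hx))]

theorem updAt_append_left (ll lr : List (Option Int)) (i : Int) (v : Int)
    (h0 : 0 ≤ i) (h : i < (ll.length : Int)) :
    updAt (ll ++ lr) i v = updAt ll i v ++ lr := by
  induction ll generalizing i with
  | nil => simp at h; omega
  | cons w ws ih =>
      by_cases hi : i ≤ 0
      · simp [updAt, hi]
      · rw [List.cons_append, updAt, if_neg hi, updAt, if_neg hi, ih (i - 1) (by omega)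
          (by simp at h; push_cast at h ⊢; omega), List.cons_append]

theorem updAt_append_right (ll lr : List (Option Int)) (i : Int) (v : Int)
    (h : (ll.length : Int) ≤ i) :
    updAt (ll ++ lr) i v = ll ++ updAt lr (i - ll.length) v := by
  induction ll generalizing i with
  | nil => simp
  | cons w ws ih =>
      have hi : ¬ i ≤ 0 := by simp at h; push_cast at h; omega
      rw [List.cons_append, updAt, if_neg hi, ih (i - 1) (by simp at h; push_cast at h ⊢; omega),
        List.cons_append]
      congr 2
      simp only [List.length_cons]
      push_cast
      ring_nf

theorem segUpdate_spec (t : Seg) (wf : SegWf t) (i v : Int) (h0 : 0 ≤ i)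
    (h1 : i < ((leavesOf t).length : Int)) :
    SegWf (segUpdate t i v) ∧ leavesOf (segUpdate t i v) = updAt (leavesOf t) i v := by
  induction t generalizing i with
  | leaf w =>
      refine ⟨trivial, ?_⟩
      simp only [leavesOf] at h1 ⊢
      have : i ≤ 0 := by simp at h1; omega
      simp [segUpdate, updAt, this, leavesOf]
  | node sz cv l r ihl ihr =>
      obtain ⟨hsz, hcv, wl, wr⟩ := wf
      rw [segUpdate]
      simp only [size_eq l wl] at *
      simp only [leavesOf] at h1 ⊢
      split_ifs with hlt
      · obtain ⟨w1, w2⟩ := ihl wl i h0 hlt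
        refine ⟨⟨by rw [w2, length_updAt]; exact hsz, rfl, w1, wr⟩, ?_⟩
        show leavesOf (segUpdate l i v) ++ leavesOf r = _
        rw [w2, updAt_append_left _ _ _ _ h0 hlt]
      · push_neg at hlt
        obtain ⟨w1, w2⟩ := ihr wr (i - (leavesOf l).length) (by omega)
          (by simp only [List.length_append] at h1; push_cast at h1 ⊢; omega)
        refine ⟨⟨by rw [w2, length_updAt]; exact hsz, rfl, wl, w1⟩, ?_⟩
        show leavesOf l ++ leavesOf (segUpdate r (i - ((leavesOf l).length : Int)) v) = _
        rw [w2, updAt_append_right _ _ _ _ hlt]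

theorem segQuery_eq (t : Seg) (wf : SegWf t) (a b : Int) :
    segQuery t a b = selMin (leavesOf t) a b := by
  induction t generalizing a b with
  | leaf v =>
      show _ = selMin [v] a b
      rw [segQuery]
      have : selMin [v] a b = if a ≤ 0 ∧ 0 < b then v else none := by
        show omin2 _ none = _
        rw [omin2_none_right]
      rw [this]
      split_ifs with h1 h2 h3 h4 <;> first | rfl | omega
  | node sz cv l r ihl ihr =>
      have wfn : SegWf (Seg.node sz cv l r) := wf
      obtain ⟨hsz, hcv, wl, wr⟩ := wf
      have hlen : (sz : Int) = ((leavesOf (Seg.node sz cv l r)).length : Int) := by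
        simp [leavesOf, hsz]
      rw [segQuery]
      split_ifs with h1 h2
      · rw [selMin_none _ _ _ (by rw [← hlen]; exact_mod_cast h1)]
      · rw [selMin_full _ _ _ h2.1 (by rw [← hlen]; exact h2.2), ← val_eq _ wfn]
        rfl
      · show omin2 (segQuery l a b) (segQuery r (a - (l.size : Int)) (b - (l.size : Int))) = _
        rw [ihl wl, ihr wr, size_eq l wl]
        exact (selMin_append (leavesOf l) (leavesOf r) a b).symm

-- ---------- the sorted position list and the index dictionary ----------
theorem union_ofList (c : List Int) :
    PySem.Set.union (PySem.Set.ofList c) [1] = PySem.Set.ofList (c ++ [(1:Int)]) := by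
  simp [PySem.Set.union, PySem.Set.ofList_eq_foldl, List.foldl_append]

theorem get?_fold_insert_of_not_mem (l : List (Int × Int)) (d : PySem.Dict Int Int) (k : Int)
    (h : ∀ p ∈ l, p.2 ≠ k) :
    (l.foldl (fun d p => d.insert p.2 p.1) d).get? k = d.get? k := by
  induction l generalizing d with
  | nil => rfl
  | cons p t ih =>
      rw [List.foldl_cons, ih _ (fun q hq => h q (List.mem_cons_of_mem _ hq)),
        PySem.Dict.get?_insert]
      rw [if_neg (fun he => h p List.mem_cons_self he.symm)]

theorem get?_fold_insert_mem (l : List (Int × Int)) (hnd : (l.map (·.2)).Nodup)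
    (i k : Int) (hmem : (i, k) ∈ l) (d : PySem.Dict Int Int) :
    (l.foldl (fun d p => d.insert p.2 p.1) d).get? k = some i := by
  induction l generalizing d with
  | nil => cases hmem
  | cons p t ih =>
      rw [List.foldl_cons]
      rcases List.mem_cons.mp hmem with h | h
      · have h2 : p.2 = k := by rw [← h]
        have hnin : p.2 ∉ t.map (·.2) := by
          have hx := hnd
          simp only [List.map_cons, List.nodup_cons] at hx
          exact hx.1
        have hnot : ∀ q ∈ t, q.2 ≠ k := by
          intro q hq he
          exact hnin (by rw [h2, ← he]; exact List.mem_map_of_mem hq)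
        rw [get?_fold_insert_of_not_mem _ _ _ hnot, ← h, PySem.Dict.get?_insert, if_pos rfl]
      · exact ih (List.nodup_cons.mp hnd).2 h _

-- ---------- positions ----------
def Pof (c : List Int) : List Int :=
  PySem.List.sorted (PySem.Set.union (PySem.Set.ofList c) [1]) (fun x => x) false

def idxOf (P : List Int) : PySem.Dict Int Int :=
  (PySem.List.enumerate P).foldl (fun d p => d.insert p.2 p.1) PySem.Dict.empty

theorem Pof_pairwise (c : List Int) : (Pof c).Pairwise (· < ·) := by
  unfold Pof
  rw [union_ofList]
  exact PySem.List.sorted_ofList_pairwise_lt _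

theorem mem_Pof (c : List Int) (x : Int) : x ∈ Pof c ↔ (x ∈ c ∨ x = 1) := by
  unfold Pof
  rw [union_ofList, PySem.List.mem_sorted, PySem.Set.mem_ofList]
  simp

theorem pw_mono (P : List Int) (h : P.Pairwise (· < ·)) (i j : Nat)
    (hi : i < P.length) (hj : j < P.length) (hij : i ≤ j) : P[i] ≤ P[j] := by
  rcases Nat.eq_or_lt_of_le hij with he | hl
  · subst he; exact le_refl _
  · exact le_of_lt (List.pairwise_iff_getElem.mp h i j hi hj hl)

theorem pw_inj (P : List Int) (h : P.Pairwise (· < ·)) (i j : Nat)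
    (hi : i < P.length) (hj : j < P.length) (he : P[i] = P[j]) : i = j := by
  rcases Nat.lt_trichotomy i j with hl | he' | hl
  · exact absurd he (ne_of_lt (List.pairwise_iff_getElem.mp h i j hi hj hl))
  · exact he'
  · exact absurd he.symm (ne_of_lt (List.pairwise_iff_getElem.mp h j i hj hi hl))

theorem pw_nodup (P : List Int) (h : P.Pairwise (· < ·)) : P.Nodup :=
  h.imp (fun hx => ne_of_lt hx)

theorem idx_get (P : List Int) (hnd : P.Nodup) (j : Nat) (hj : j < P.length) :
    (idxOf P).get? (P[j]) = some (j : Int) := by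
  apply get?_fold_insert_mem
  · rw [show (PySem.List.enumerate P).map (·.2) = P from PySem.List.map_snd_enumerate _ _]
    exact hnd
  · rw [PySem.List.mem_enumerate_iff]
    exact ⟨j, hj, by simp⟩

-- ---------- dist inequalities ----------
theorem distB_le₁ (n a b : Int) (h : a ≤ b) : distB n a b ≤ b - a := by
  unfold distB; dsimp only; split_ifs <;> omega

theorem distB_le₂ (n a b : Int) (h : b ≤ a) : distB n a b ≤ a - b := by
  unfold distB; dsimp only; split_ifs <;> omega

theorem distB_le₃ (n a b : Int) : distB n a b ≤ n + (a - b) := by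
  unfold distB; dsimp only; split_ifs <;> omega

theorem distB_le₄ (n a b : Int) : distB n a b ≤ n + (b - a) := by
  unfold distB; dsimp only; split_ifs <;> omega

theorem distB_cases (n a b : Int) :
    (a ≤ b ∧ distB n a b = b - a) ∨ (b ≤ a ∧ distB n a b = a - b) ∨
    (a ≤ b ∧ distB n a b = n + (a - b)) ∨ (b ≤ a ∧ distB n a b = n + (b - a)) := by
  unfold distB; dsimp only; split_ifs <;> omega

theorem stayList_mem_iff (n t : Int) (dp : PySem.Dict Int Int) (hnd : dp.keys.Nodup) (v : Int) :
    v ∈ stayList n t dp ↔ ∃ o w, dp.get? o = some w ∧ v = w + distB n o t := by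
  unfold stayList
  simp only [List.mem_map]
  constructor
  · rintro ⟨⟨o, w⟩, hm, hv⟩
    exact ⟨o, w, PySem.Dict.get?_of_mem_items dp hm hnd, hv.symm⟩
  · rintro ⟨o, w, hg, hv⟩
    exact ⟨(o, w), PySem.Dict.mem_items_of_get?_eq_some dp hg, hv.symm⟩

-- ---------- the four-candidate minimum of the loop body ----------
def bestOf (q1 q2 q3 q4 : Option Int) (n t : Int) : Option Int :=
  let b0 : Option Int := none
  let b1 := match q1 with | none => b0 | some v => omin2 b0 (some (v + t))
  let b2 := match q2 with | none => b1 | some v => omin2 b1 (some (v - t))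
  let b3 := match q3 with | none => b2 | some v => omin2 b2 (some (v + n - t))
  match q4 with | none => b3 | some v => omin2 b3 (some (v + n + t))

theorem bestOf_eq (q1 q2 q3 q4 : Option Int) (n t : Int) :
    bestOf q1 q2 q3 q4 n t
      = minO [q1.map (fun v => v + t), q2.map (fun v => v - t),
              q3.map (fun v => v + n - t), q4.map (fun v => v + n + t)] := by
  cases q1 <;> cases q2 <;> cases q3 <;> cases q4 <;> rfl


-- ---------- the B-side invariant ----------
def Inv2 (P : List Int) (dp : PySem.Dict Int Int) (off prev : Int) (tb tp tm : Seg) : Prop :=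
  SegWf tb ∧ SegWf tp ∧ SegWf tm ∧
  leavesOf tb = P.map (fun p => (dp.get? p).map (fun v => v - off)) ∧
  leavesOf tp = P.map (fun p => (dp.get? p).map (fun v => v - off + p)) ∧
  leavesOf tm = P.map (fun p => (dp.get? p).map (fun v => v - off - p)) ∧
  (∀ k v, dp.get? k = some v → k ∈ P) ∧
  dp.keys.Nodup ∧
  (∃ o w, dp.get? o = some w) ∧
  prev ∈ P

theorem best_eq (n t off : Int) (P : List Int) (dp : PySem.Dict Int Int)
    (hP : P.Pairwise (· < ·)) (hnd : dp.keys.Nodup)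
    (hkeys : ∀ k v, dp.get? k = some v → k ∈ P)
    (jt : Nat) (hjt : jt < P.length) (hPjt : P[jt] = t)
    (s : Int) (hs : PySem.List.min? (stayList n t dp) (fun x => x) = some s) :
    bestOf (selMin (P.map (fun p => (dp.get? p).map (fun v => v - off - p))) 0 ((jt : Int) + 1))
           (selMin (P.map (fun p => (dp.get? p).map (fun v => v - off + p))) ((jt : Int)) ((P.length : Int)))
           (minO (P.map (fun p => (dp.get? p).map (fun v => v - off + p))))
           (minO (P.map (fun p => (dp.get? p).map (fun v => v - off - p))))
           n t
      = some (s - off) := by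
  have hLmlen : (P.map (fun p => (dp.get? p).map (fun v => v - off - p))).length = P.length := by simp
  have hLplen : (P.map (fun p => (dp.get? p).map (fun v => v - off + p))).length = P.length := by simp
  have hLmget : ∀ (j : Nat) (hj : j < P.length) (q : Int),
      (P.map (fun p => (dp.get? p).map (fun v => v - off - p)))[j]'(by omega) = some q →
        ∃ w, dp.get? (P[j]) = some w ∧ q = w - off - P[j] := by
    intro j hj q hq
    rw [List.getElem_map] at hq
    cases hg : dp.get? (P[j]) with
    | none => rw [hg] at hq; cases hq
    | some w =>
        rw [hg] at hq
        simp only [Option.map_some, Option.some_inj] at hq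
        exact ⟨w, rfl, hq.symm⟩
  have hLpget : ∀ (j : Nat) (hj : j < P.length) (q : Int),
      (P.map (fun p => (dp.get? p).map (fun v => v - off + p)))[j]'(by omega) = some q →
        ∃ w, dp.get? (P[j]) = some w ∧ q = w - off + P[j] := by
    intro j hj q hq
    rw [List.getElem_map] at hq
    cases hg : dp.get? (P[j]) with
    | none => rw [hg] at hq; cases hq
    | some w =>
        rw [hg] at hq
        simp only [Option.map_some, Option.some_inj] at hq
        exact ⟨w, rfl, hq.symm⟩
  have hLmget' : ∀ (j : Nat) (hj : j < P.length) (w : Int), dp.get? (P[j]) = some w →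
      (P.map (fun p => (dp.get? p).map (fun v => v - off - p)))[j]'(by omega) = some (w - off - P[j]) := by
    intro j hj w hg
    rw [List.getElem_map, hg]
    rfl
  have hLpget' : ∀ (j : Nat) (hj : j < P.length) (w : Int), dp.get? (P[j]) = some w →
      (P.map (fun p => (dp.get? p).map (fun v => v - off + p)))[j]'(by omega) = some (w - off + P[j]) := by
    intro j hj w hg
    rw [List.getElem_map, hg]
    rfl
  have hsle : ∀ o w, dp.get? o = some w → s ≤ w + distB n o t := by
    intro o w hg
    exact PySem.List.min?_isMin hs _ ((stayList_mem_iff n t dp hnd _).mpr ⟨o, w, hg, rfl⟩)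
  rw [bestOf_eq]
  have hGE : GEm (minO [(selMin (P.map (fun p => (dp.get? p).map (fun v => v - off - p))) 0 ((jt : Int) + 1)).map (fun v => v + t),
      (selMin (P.map (fun p => (dp.get? p).map (fun v => v - off + p))) ((jt : Int)) ((P.length : Int))).map (fun v => v - t),
      (minO (P.map (fun p => (dp.get? p).map (fun v => v - off + p)))).map (fun v => v + n - t),
      (minO (P.map (fun p => (dp.get? p).map (fun v => v - off - p)))).map (fun v => v + n + t)]) (s - off) := by
    intro v hv
    have hmem := minO_mem _ _ hv
    simp only [List.mem_cons, List.not_mem_nil, or_false] at hmem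
    rcases hmem with h | h | h | h
    · cases hq : selMin (P.map (fun p => (dp.get? p).map (fun v => v - off - p))) 0 ((jt : Int) + 1) with
      | none => rw [hq] at h; cases h
      | some q =>
          rw [hq] at h
          simp only [Option.map_some, Option.some_inj] at h
          obtain ⟨j, hj, hja, hjb, hget⟩ := selMin_mem _ _ _ q hq
          have hjP : j < P.length := by omega
          obtain ⟨w, hw, hqv⟩ := hLmget j hjP q hget
          have hjle : j ≤ jt := by omega
          have hole : P[j] ≤ t := hPjt ▸ pw_mono P hP j jt hjP hjt hjle
          have h1 := hsle _ _ hw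
          have h2 := distB_le₁ n (P[j]) t hole
          omega
    · cases hq : selMin (P.map (fun p => (dp.get? p).map (fun v => v - off + p))) ((jt : Int)) ((P.length : Int)) with
      | none => rw [hq] at h; cases h
      | some q =>
          rw [hq] at h
          simp only [Option.map_some, Option.some_inj] at h
          obtain ⟨j, hj, hja, hjb, hget⟩ := selMin_mem _ _ _ q hq
          have hjP : j < P.length := by omega
          obtain ⟨w, hw, hqv⟩ := hLpget j hjP q hget
          have hjge : jt ≤ j := by omega
          have hole : t ≤ P[j] := hPjt ▸ pw_mono P hP jt j hjt hjP hjge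
          have h1 := hsle _ _ hw
          have h2 := distB_le₂ n (P[j]) t hole
          omega
    · cases hq : minO (P.map (fun p => (dp.get? p).map (fun v => v - off + p))) with
      | none => rw [hq] at h; cases h
      | some q =>
          rw [hq] at h
          simp only [Option.map_some, Option.some_inj] at h
          have hmm := minO_mem _ _ hq
          obtain ⟨p, hpP, hpq⟩ := List.mem_map.mp hmm
          cases hg : dp.get? p with
          | none => rw [hg] at hpq; cases hpq
          | some w =>
              rw [hg] at hpq
              simp only [Option.map_some, Option.some_inj] at hpq
              have h1 := hsle _ _ hg
              have h2 := distB_le₃ n p t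
              omega
    · cases hq : minO (P.map (fun p => (dp.get? p).map (fun v => v - off - p))) with
      | none => rw [hq] at h; cases h
      | some q =>
          rw [hq] at h
          simp only [Option.map_some, Option.some_inj] at h
          have hmm := minO_mem _ _ hq
          obtain ⟨p, hpP, hpq⟩ := List.mem_map.mp hmm
          cases hg : dp.get? p with
          | none => rw [hg] at hpq; cases hpq
          | some w =>
              rw [hg] at hpq
              simp only [Option.map_some, Option.some_inj] at hpq
              have h1 := hsle _ _ hg
              have h2 := distB_le₄ n p t
              omega
  have hsmem := PySem.List.min?_mem hs
  rw [stayList_mem_iff n t dp hnd] at hsmem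
  obtain ⟨o, w, hw, hsv⟩ := hsmem
  obtain ⟨jo, hjo, hPjo⟩ := List.mem_iff_getElem.mp (hkeys o w hw)
  have hwo : dp.get? (P[jo]) = some w := by rw [hPjo]; exact hw
  -- one candidate term is ≤ s - off
  have hLE : ∃ u, u ≤ s - off ∧ some u ∈ [(selMin (P.map (fun p => (dp.get? p).map (fun v => v - off - p))) 0 ((jt : Int) + 1)).map (fun v => v + t),
      (selMin (P.map (fun p => (dp.get? p).map (fun v => v - off + p))) ((jt : Int)) ((P.length : Int))).map (fun v => v - t),
      (minO (P.map (fun p => (dp.get? p).map (fun v => v - off + p)))).map (fun v => v + n - t),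
      (minO (P.map (fun p => (dp.get? p).map (fun v => v - off - p)))).map (fun v => v + n + t)] := by
    rcases distB_cases n o t with ⟨hot, hdist⟩ | ⟨hto, hdist⟩ | ⟨hot, hdist⟩ | ⟨hto, hdist⟩
    · have hjole : jo ≤ jt := by
        by_contra hgt
        have := List.pairwise_iff_getElem.mp hP jt jo hjt hjo (by omega)
        rw [hPjt, hPjo] at this
        omega
      obtain ⟨q, hqeq, hqle⟩ := selMin_le _ 0 ((jt : Int) + 1) jo (by omega)
        (by positivity) (by push_cast; omega) _ (hLmget' jo hjo w hwo)
      refine ⟨q + t, by rw [hPjo] at hqle; omega, ?_⟩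
      rw [hqeq]
      exact List.mem_cons_self
    · have hjoge : jt ≤ jo := by
        by_contra hgt
        have := List.pairwise_iff_getElem.mp hP jo jt hjo hjt (by omega)
        rw [hPjt, hPjo] at this
        omega
      obtain ⟨q, hqeq, hqle⟩ := selMin_le _ ((jt : Int)) ((P.length : Int)) jo (by omega)
        (by push_cast; omega) (by push_cast; omega) _ (hLpget' jo hjo w hwo)
      refine ⟨q - t, by rw [hPjo] at hqle; omega, ?_⟩
      rw [hqeq]
      exact List.mem_cons_of_mem _ List.mem_cons_self
    · have hmem3 : some (w - off + o) ∈ (P.map (fun p => (dp.get? p).map (fun v => v - off + p))) := by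
        refine List.mem_map.mpr ⟨o, ?_, by rw [hw]; rfl⟩
        rw [← hPjo]
        exact List.getElem_mem hjo
      obtain ⟨q, hqeq, hqle⟩ := minO_le _ _ hmem3
      refine ⟨q + n - t, by omega, ?_⟩
      rw [hqeq]
      exact List.mem_cons_of_mem _ (List.mem_cons_of_mem _ List.mem_cons_self)
    · have hmem4 : some (w - off - o) ∈ (P.map (fun p => (dp.get? p).map (fun v => v - off - p))) := by
        refine List.mem_map.mpr ⟨o, ?_, by rw [hw]; rfl⟩
        rw [← hPjo]
        exact List.getElem_mem hjo
      obtain ⟨q, hqeq, hqle⟩ := minO_le _ _ hmem4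
      refine ⟨q + n + t, by omega, ?_⟩
      rw [hqeq]
      exact List.mem_cons_of_mem _ (List.mem_cons_of_mem _ (List.mem_cons_of_mem _ List.mem_cons_self))
  obtain ⟨u, hule, humem⟩ := hLE
  obtain ⟨V, hVeq, hVle⟩ := minO_le _ _ humem
  rw [hVeq]
  exact congrArg some (le_antisymm (le_trans hVle hule) (hGE V hVeq))

-- how a point min-update transforms the encoded leaves
theorem leaves_update (P : List Int) (hP : P.Pairwise (· < ·)) (dp dp' : PySem.Dict Int Int)
    (off off' prev : Int) (g : Int → Int)
    (jp : Nat) (hjp : jp < P.length) (hPjp : P[jp] = prev)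
    (snew : Int)
    (hprev' : dp'.get? prev = some snew)
    (hother : ∀ p, p ≠ prev → dp'.get? p = (dp.get? p).map (fun v => v + (off' - off)))
    (hmin : ∀ w1, dp.get? prev = some w1 → snew - off' ≤ w1 - off) :
    updAt (P.map (fun p => (dp.get? p).map (fun v => v - off + g p))) ((jp : Int)) (snew - off' + g prev)
      = P.map (fun p => (dp'.get? p).map (fun v => v - off' + g p)) := by
  apply List.ext_getElem
  · rw [length_updAt]; simp
  · intro j h1 h2
    have hjP : j < P.length := by simpa using h2
    rw [getElem_updAt _ _ _ (Int.natCast_nonneg jp) j (by simpa using hjP)]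
    rw [List.getElem_map, List.getElem_map]
    by_cases hj : j = jp
    · subst hj
      rw [if_pos rfl, hPjp, hprev']
      cases hg : dp.get? prev with
      | none => rfl
      | some w1 =>
          have hle := hmin w1 hg
          simp only [Option.map_some, omin2, Option.some_inj]
          rw [min_eq_right (by omega)]
    · rw [if_neg (fun he => hj (by exact_mod_cast he))]
      have hne : P[j] ≠ prev := fun he => hj (pw_inj P hP j jp hjP hjp (by rw [he, hPjp]))
      rw [hother _ hne]
      cases hg : dp.get? (P[j]) with
      | none => rfl
      | some w1 =>
          simp only [Option.map_some, Option.some_inj]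
          ring

theorem inv2_step (n : Int) (P : List Int) (idx : PySem.Dict Int Int)
    (hP : P.Pairwise (· < ·))
    (hidx : ∀ (j : Nat) (hj : j < P.length), idx.get? (P[j]) = some (j : Int))
    (dp : PySem.Dict Int Int) (off prev : Int) (tb tp tm : Seg) (t : Int)
    (ht : t ∈ P) (hinv : Inv2 P dp off prev tb tp tm) :
    ∃ tb' tp' tm',
      segStep n P idx ((tb, tp, tm), off, prev) t
        = ((tb', tp', tm'), off + distB n prev t, t) ∧
      Inv2 P (bStep n (prev, dp) t).2 (off + distB n prev t) t tb' tp' tm' := by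
  obtain ⟨wb, wp, wm, hLb, hLp, hLm, hkeys, hnd, ⟨o0, w0, ho0⟩, hprevP⟩ := hinv
  obtain ⟨jt, hjt, hPjt⟩ := List.mem_iff_getElem.mp ht
  obtain ⟨jp, hjp, hPjp⟩ := List.mem_iff_getElem.mp hprevP
  have hidxt : idx.get? t = some ((jt : Int)) := by rw [← hPjt]; exact hidx jt hjt
  have hidxp : idx.get? prev = some ((jp : Int)) := by rw [← hPjp]; exact hidx jp hjp
  have hne : dp.items ≠ [] := by
    intro h
    have := PySem.Dict.mem_items_of_get?_eq_some dp ho0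
    rw [h] at this
    cases this
  obtain ⟨s, hs⟩ := stayList_some n prev t dp hne
  have hsle : ∀ o w, dp.get? o = some w → s ≤ w + distB n o t := by
    intro o w hg
    exact PySem.List.min?_isMin hs _ ((stayList_mem_iff n t dp hnd _).mpr ⟨o, w, hg, rfl⟩)
  have hbest : bestOf (segQuery tm 0 ((jt : Int) + 1)) (segQuery tp ((jt : Int)) ((P.length : Int)))
      tp.val tm.val n t = some (s - off) := by
    rw [segQuery_eq tm wm, segQuery_eq tp wp, val_eq tp wp, val_eq tm wm, hLm, hLp]
    exact best_eq n t off P dp hP hnd hkeys jt hjt hPjt s hs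
  have hseg : segStep n P idx ((tb, tp, tm), off, prev) t
      = ((segUpdate tb ((idx.get? prev).getD 0)
            (off + (bestOf (segQuery tm 0 ((idx.get? t).getD 0 + 1))
              (segQuery tp ((idx.get? t).getD 0) ((P.length : Int))) tp.val tm.val n t).getD 0
              - (off + distB n prev t)),
          segUpdate tp ((idx.get? prev).getD 0)
            (off + (bestOf (segQuery tm 0 ((idx.get? t).getD 0 + 1))
              (segQuery tp ((idx.get? t).getD 0) ((P.length : Int))) tp.val tm.val n t).getD 0
              - (off + distB n prev t) + prev),
          segUpdate tm ((idx.get? prev).getD 0)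
            (off + (bestOf (segQuery tm 0 ((idx.get? t).getD 0 + 1))
              (segQuery tp ((idx.get? t).getD 0) ((P.length : Int))) tp.val tm.val n t).getD 0
              - (off + distB n prev t) - prev)),
         off + distB n prev t, t) := rfl
  rw [hseg, hidxt, hidxp]
  simp only [Option.getD_some]
  rw [hbest]
  simp only [Option.getD_some]
  have e1 : off + (s - off) - (off + distB n prev t) = s - (off + distB n prev t) := by ring
  rw [e1]
  refine ⟨_, _, _, rfl, ?_⟩
  -- the model step
  have hmodel := bStep_get? n prev t dp hnd hne
  have hprev' : (bStep n (prev, dp) t).2.get? prev = some s := by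
    rw [hmodel prev, if_pos rfl]
    exact hs
  have hother : ∀ p, p ≠ prev →
      (bStep n (prev, dp) t).2.get? p
        = (dp.get? p).map (fun v => v + ((off + distB n prev t) - off)) := by
    intro p hp
    rw [hmodel p, if_neg hp]
    have : (off + distB n prev t) - off = distB n prev t := by ring
    rw [this]
  have hmin : ∀ w1, dp.get? prev = some w1 → s - (off + distB n prev t) ≤ w1 - off := by
    intro w1 hg
    have := hsle prev w1 hg
    omega
  have hlenb : ((jp : Int)) < ((leavesOf tb).length : Int) := by
    rw [hLb]
    simp only [List.length_map]
    exact_mod_cast hjp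
  have hlenp : ((jp : Int)) < ((leavesOf tp).length : Int) := by
    rw [hLp]
    simp only [List.length_map]
    exact_mod_cast hjp
  have hlenm : ((jp : Int)) < ((leavesOf tm).length : Int) := by
    rw [hLm]
    simp only [List.length_map]
    exact_mod_cast hjp
  obtain ⟨wb', hb'⟩ := segUpdate_spec tb wb ((jp : Int)) (s - (off + distB n prev t))
    (Int.natCast_nonneg jp) hlenb
  obtain ⟨wp', hp'⟩ := segUpdate_spec tp wp ((jp : Int)) (s - (off + distB n prev t) + prev)
    (Int.natCast_nonneg jp) hlenp
  obtain ⟨wm', hm'⟩ := segUpdate_spec tm wm ((jp : Int)) (s - (off + distB n prev t) - prev)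
    (Int.natCast_nonneg jp) hlenm
  refine ⟨wb', wp', wm', ?_, ?_, ?_, ?_, ?_, ⟨prev, s, hprev'⟩, ht⟩
  · rw [hb', hLb]
    have hlu := leaves_update P hP dp ((bStep n (prev, dp) t).2) off (off + distB n prev t) prev
      (fun _ => (0 : Int)) jp hjp hPjp s hprev' hother hmin
    simp only [add_zero] at hlu
    exact hlu
  · rw [hp', hLp]
    exact leaves_update P hP dp ((bStep n (prev, dp) t).2) off (off + distB n prev t) prev
      (fun p => p) jp hjp hPjp s hprev' hother hmin
  · rw [hm', hLm]
    have hlu := leaves_update P hP dp ((bStep n (prev, dp) t).2) off (off + distB n prev t) prev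
      (fun p => -p) jp hjp hPjp s hprev' hother hmin
    simp only [← sub_eq_add_neg] at hlu
    exact hlu
  · intro k v hk
    by_cases hkp : k = prev
    · rw [hkp]; exact hprevP
    · rw [hother k hkp] at hk
      cases hg : dp.get? k with
      | none => rw [hg] at hk; cases hk
      | some w1 => exact hkeys k w1 hg
  · exact bStep_nodup n prev t dp

-- the initial leaf encoding
theorem init_leaves (P : List Int) (hP : P.Pairwise (· < ·)) (j1 : Nat) (hj1 : j1 < P.length)
    (hPj1 : P[j1] = 1) (g : Int → Int) :
    updAt (List.replicate P.length (none : Option Int)) ((j1 : Int)) (g 1)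
      = P.map (fun p => (((PySem.Dict.empty : PySem.Dict Int Int).insert 1 0).get? p).map (fun v => v - 0 + g p)) := by
  apply List.ext_getElem
  · rw [length_updAt]; simp
  · intro j h1 h2
    have hjP : j < P.length := by simpa using h2
    rw [getElem_updAt _ _ _ (Int.natCast_nonneg j1) j (by simpa using hjP)]
    rw [List.getElem_replicate, List.getElem_map]
    by_cases hj : j = j1
    · subst hj
      rw [if_pos rfl, hPj1]
      rw [show ((PySem.Dict.empty : PySem.Dict Int Int).insert 1 0).get? 1 = some 0 by
        rw [PySem.Dict.get?_insert]; simp]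
      show some (g 1) = some (0 - 0 + g 1)
      norm_num
    · rw [if_neg (fun he => hj (by exact_mod_cast he))]
      have hne : P[j] ≠ 1 := fun he => hj (pw_inj P hP j j1 hjP hj1 (by rw [he, hPj1]))
      rw [show ((PySem.Dict.empty : PySem.Dict Int Int).insert 1 0).get? (P[j]) = none by
        rw [PySem.Dict.get?_insert, if_neg hne]; rfl]
      rfl

theorem inv2_init (c : List Int) :
    Inv2 (Pof c) ((PySem.Dict.empty).insert 1 0) 0 1
      (segUpdate (segBuild (List.replicate (Pof c).length (none : Option Int))) (((idxOf (Pof c)).get? 1).getD 0) 0)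
      (segUpdate (segBuild (List.replicate (Pof c).length (none : Option Int))) (((idxOf (Pof c)).get? 1).getD 0) (0 + 1))
      (segUpdate (segBuild (List.replicate (Pof c).length (none : Option Int))) (((idxOf (Pof c)).get? 1).getD 0) (0 - 1)) := by
  have hP := Pof_pairwise c
  have h1P : (1 : Int) ∈ Pof c := (mem_Pof c 1).mpr (Or.inr rfl)
  obtain ⟨j1, hj1, hPj1⟩ := List.mem_iff_getElem.mp h1P
  have hidx1 : (idxOf (Pof c)).get? 1 = some ((j1 : Int)) := by
    rw [← hPj1]
    exact idx_get _ (pw_nodup _ hP) j1 hj1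
  have hrep : (List.replicate (Pof c).length (none : Option Int)) ≠ [] := by
    simp only [ne_eq, List.replicate_eq_nil_iff]
    omega
  obtain ⟨wf0, hl0⟩ := segBuild_spec (Pof c).length _ (by simp) hrep
  have hlen0 : ((j1 : Int)) < ((leavesOf (segBuild (List.replicate (Pof c).length (none : Option Int)))).length : Int) := by
    rw [hl0]
    simp only [List.length_replicate]
    exact_mod_cast hj1
  rw [hidx1]
  simp only [Option.getD_some]
  obtain ⟨wb, hb⟩ := segUpdate_spec _ wf0 ((j1 : Int)) 0 (Int.natCast_nonneg j1) hlen0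
  obtain ⟨wp, hp⟩ := segUpdate_spec _ wf0 ((j1 : Int)) (0 + 1) (Int.natCast_nonneg j1) hlen0
  obtain ⟨wm, hm⟩ := segUpdate_spec _ wf0 ((j1 : Int)) (0 - 1) (Int.natCast_nonneg j1) hlen0
  refine ⟨wb, wp, wm, ?_, ?_, ?_, ?_, ?_, ⟨1, 0, by rw [PySem.Dict.get?_insert]; simp⟩, h1P⟩
  · rw [hb, hl0]
    have hlu := init_leaves (Pof c) hP j1 hj1 hPj1 (fun _ => (0 : Int))
    simp only [add_zero] at hlu
    exact hlu
  · rw [hp, hl0]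
    exact init_leaves (Pof c) hP j1 hj1 hPj1 (fun p => p)
  · rw [hm, hl0]
    have hlu := init_leaves (Pof c) hP j1 hj1 hPj1 (fun p => -p)
    simp only [← sub_eq_add_neg] at hlu
    exact hlu
  · intro k v hk
    rw [PySem.Dict.get?_insert] at hk
    split_ifs at hk with hk1
    · rw [hk1]; exact h1P
    · rw [PySem.Dict.get?_empty] at hk; cases hk
  · exact PySem.Dict.nodup_keys_insert _ _ _ PySem.Dict.nodup_keys_empty

theorem inv2_loop (n : Int) (P : List Int) (idx : PySem.Dict Int Int)
    (hP : P.Pairwise (· < ·))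
    (hidx : ∀ (j : Nat) (hj : j < P.length), idx.get? (P[j]) = some (j : Int)) :
    ∀ (c' : List Int), (∀ x ∈ c', x ∈ P) →
    ∀ (dp : PySem.Dict Int Int) (off prev : Int) (tb tp tm : Seg), Inv2 P dp off prev tb tp tm →
    ∃ tbf tpf tmf offf,
      c'.foldl (segStep n P idx) ((tb, tp, tm), off, prev)
        = ((tbf, tpf, tmf), offf, (c'.foldl (bStep n) (prev, dp)).1) ∧
      Inv2 P (c'.foldl (bStep n) (prev, dp)).2 offf (c'.foldl (bStep n) (prev, dp)).1 tbf tpf tmf := by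
  intro c'
  induction c' with
  | nil =>
      intro _ dp off prev tb tp tm h
      exact ⟨tb, tp, tm, off, rfl, h⟩
  | cons x xs ih =>
      intro hc dp off prev tb tp tm h
      obtain ⟨tb', tp', tm', hstep, hinv'⟩ :=
        inv2_step n P idx hP hidx dp off prev tb tp tm x (hc x List.mem_cons_self) h
      obtain ⟨tbf, tpf, tmf, offf, hfold, hinvf⟩ :=
        ih (fun y hy => hc y (List.mem_cons_of_mem _ hy)) ((bStep n (prev, dp) x).2)
          (off + distB n prev x) x tb' tp' tm' hinv'
      refine ⟨tbf, tpf, tmf, offf, ?_, ?_⟩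
      · rw [List.foldl_cons, hstep, List.foldl_cons,
          show bStep n (prev, dp) x = (x, (bStep n (prev, dp) x).2) from rfl] at *
        exact hfold
      · rw [List.foldl_cons, show bStep n (prev, dp) x = (x, (bStep n (prev, dp) x).2) from rfl]
        exact hinvf

theorem mem_values_iff (dp : PySem.Dict Int Int) (hnd : dp.keys.Nodup) (v : Int) :
    v ∈ dp.values ↔ ∃ o, dp.get? o = some v := by
  show v ∈ dp.items.map (·.2) ↔ _
  simp only [List.mem_map]
  constructor
  · rintro ⟨⟨o, w⟩, hm, hv⟩
    exact ⟨o, by rw [PySem.Dict.get?_of_mem_items dp hm hnd]; exact congrArg some hv⟩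
  · rintro ⟨o, hg⟩
    exact ⟨(o, v), PySem.Dict.mem_items_of_get?_eq_some dp hg, rfl⟩

theorem inv2_final (P : List Int) (dp : PySem.Dict Int Int) (off prev : Int) (tb tp tm : Seg)
    (hinv : Inv2 P dp off prev tb tp tm) :
    off + (tb.val).getD 0 = (PySem.List.min? dp.values (fun x => x)).getD 0 := by
  obtain ⟨wb, _, _, hLb, _, _, hkeys, hnd, ⟨o0, w0, ho0⟩, _⟩ := hinv
  obtain ⟨s, hs⟩ : ∃ s, PySem.List.min? dp.values (fun x => x) = some s := by
    cases hq : PySem.List.min? dp.values (fun x => x) with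
    | none =>
        rw [PySem.List.min?_eq_none_iff] at hq
        have := (mem_values_iff dp hnd w0).mpr ⟨o0, ho0⟩
        rw [hq] at this
        cases this
    | some s => exact ⟨s, rfl⟩
  have hGE : ∀ v, minO (leavesOf tb) = some v → s - off ≤ v := by
    intro v hv
    have hmm := minO_mem _ _ hv
    rw [hLb] at hmm
    obtain ⟨p, hpP, hpq⟩ := List.mem_map.mp hmm
    cases hg : dp.get? p with
    | none => rw [hg] at hpq; cases hpq
    | some w =>
        rw [hg] at hpq
        simp only [Option.map_some, Option.some_inj] at hpq
        have hwv := PySem.List.min?_isMin hs w ((mem_values_iff dp hnd w).mpr ⟨p, hg⟩)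
        simp only at hwv
        omega
  obtain ⟨os, hos⟩ : ∃ o, dp.get? o = some s :=
    (mem_values_iff dp hnd s).mp (PySem.List.min?_mem hs)
  have hmemb : some (s - off) ∈ leavesOf tb := by
    rw [hLb]
    exact List.mem_map.mpr ⟨os, hkeys os s hos, by rw [hos]; rfl⟩
  obtain ⟨V, hVeq, hVle⟩ := minO_le _ _ hmemb
  rw [val_eq tb wb, hVeq, hs]
  have : V = s - off := le_antisymm hVle (hGE V hVeq)
  rw [this]
  simp only [Option.getD_some]
  ring

theorem part2 (n m : Int) (c : List Int) :
    solve_alt n m c =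
      (PySem.List.min? ((c.foldl (bStep n) (1, (PySem.Dict.empty).insert 1 0)).2.values) (fun x => x)).getD 0 := by
  have hP := Pof_pairwise c
  have hidx : ∀ (j : Nat) (hj : j < (Pof c).length), (idxOf (Pof c)).get? ((Pof c)[j]) = some (j : Int) :=
    idx_get (Pof c) (pw_nodup _ hP)
  obtain ⟨tbf, tpf, tmf, offf, hfold, hinvf⟩ :=
    inv2_loop n (Pof c) (idxOf (Pof c)) hP hidx c
      (fun x hx => (mem_Pof c x).mpr (Or.inl hx))
      ((PySem.Dict.empty).insert 1 0) 0 1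
      (segUpdate (segBuild (List.replicate (Pof c).length (none : Option Int))) (((idxOf (Pof c)).get? 1).getD 0) 0)
      (segUpdate (segBuild (List.replicate (Pof c).length (none : Option Int))) (((idxOf (Pof c)).get? 1).getD 0) (0 + 1))
      (segUpdate (segBuild (List.replicate (Pof c).length (none : Option Int))) (((idxOf (Pof c)).get? 1).getD 0) (0 - 1))
      (inv2_init c)
  have hdef : solve_alt n m c
      = (c.foldl (segStep n (Pof c) (idxOf (Pof c)))
          ((segUpdate (segBuild (List.replicate (Pof c).length (none : Option Int))) (((idxOf (Pof c)).get? 1).getD 0) 0,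
            segUpdate (segBuild (List.replicate (Pof c).length (none : Option Int))) (((idxOf (Pof c)).get? 1).getD 0) (0 + 1),
            segUpdate (segBuild (List.replicate (Pof c).length (none : Option Int))) (((idxOf (Pof c)).get? 1).getD 0) (0 - 1)),
           0, 1)).2.1
        + ((c.foldl (segStep n (Pof c) (idxOf (Pof c)))
          ((segUpdate (segBuild (List.replicate (Pof c).length (none : Option Int))) (((idxOf (Pof c)).get? 1).getD 0) 0,
            segUpdate (segBuild (List.replicate (Pof c).length (none : Option Int))) (((idxOf (Pof c)).get? 1).getD 0) (0 + 1),
            segUpdate (segBuild (List.replicate (Pof c).length (none : Option Int))) (((idxOf (Pof c)).get? 1).getD 0) (0 - 1)),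
           0, 1)).1.1.val).getD 0 := rfl
  rw [hdef, hfold]
  exact inv2_final (Pof c) _ offf _ tbf tpf tmf hinvf

-- ===== VERDICT (by name: the statement is the Claim_ definition above) =====
theorem solve_spec : Claim_equal_solve := by
  intro n m c _
  unfold Spec_solve
  rw [part1 n m c, part2 n m c]
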